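-- pv_equiv track=rewrite | github.com/deysantanu84/python-portfolio | problemSolving/stringManipulation/boringSubstring.py | solve
-- ===== SOURCE A (Python) =====
-- def solve(A):
--     result = 0
--     evenChars = []
--     oddChars = []
--
--     for char in A:
--         if ord(char) % 2 == 0:
--             evenChars.append(char)
--
--         else:
--             oddChars.append(char)
--
--     if not len(evenChars) or not len(oddChars):
--         return 1
--
--     if abs(ord(min(evenChars)) - ord(max(oddChars))) != 1 \
--             or abs(ord(max(evenChars)) - ord(min(oddChars))) != 1:
--         result = 1
--
--     return result
-- ===== SOURCE B (Python) =====
-- def solve(A):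
--     # One fused pass: track the four ordinal extrema directly, no lists built.
--     minE = maxE = minO = maxO = None
--     for char in A:
--         o = ord(char)
--         if o % 2 == 0:
--             if minE is None or o < minE:
--                 minE = o
--             if maxE is None or o > maxE:
--                 maxE = o
--         else:
--             if minO is None or o < minO:
--                 minO = o
--             if maxO is None or o > maxO:
--                 maxO = o
--     if minE is None or minO is None:
--         return 1
--     if abs(minE - maxO) == 1 and abs(maxE - minO) == 1:
--         return 0
--     return 1
-- ===== Notes on version B (the rewrite author's own statement) =====
-- stated objective: alternative
-- what changed: Replaces A's two accumulated character lists plus four separate min()/max() reductions by a single pass that maintains the four integer extrema (minE, maxE, minO, maxO) inline, deciding emptiness of each parity group from the None sentinels.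
import Mathlib
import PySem

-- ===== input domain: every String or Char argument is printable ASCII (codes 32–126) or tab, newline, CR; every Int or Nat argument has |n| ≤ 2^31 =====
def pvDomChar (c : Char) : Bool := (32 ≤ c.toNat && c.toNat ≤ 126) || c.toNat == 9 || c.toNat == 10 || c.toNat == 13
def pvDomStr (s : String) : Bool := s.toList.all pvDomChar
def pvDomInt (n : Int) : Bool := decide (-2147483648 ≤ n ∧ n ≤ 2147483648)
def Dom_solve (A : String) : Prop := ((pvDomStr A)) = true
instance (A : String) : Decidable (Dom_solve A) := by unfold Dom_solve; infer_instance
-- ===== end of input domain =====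

-- B differs from A by fusing the bucketing and the four min/max reductions into one
-- O(1)-space pass over the ordinals (objective: alternative decomposition).

-- ===== PORT A =====
-- A buckets the characters into two lists by ord parity, then calls min/max on each list.
def solve (A : String) : Int :=
  let st := A.toList.foldl
    (fun (p : List Char × List Char) char =>
      if char.toNat % 2 == 0 then (p.1 ++ [char], p.2) else (p.1, p.2 ++ [char]))
    ([], [])
  let evenChars := st.1
  let oddChars := st.2
  if evenChars.length == 0 || oddChars.length == 0 then 1
  else
    match PySem.List.min? evenChars (fun c => c), PySem.List.max? oddChars (fun c => c),
          PySem.List.max? evenChars (fun c => c), PySem.List.min? oddChars (fun c => c) with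
    | some mnE, some mxO, some mxE, some mnO =>
      if ((mnE.toNat : Int) - (mxO.toNat : Int)).natAbs ≠ 1 ∨
         ((mxE.toNat : Int) - (mnO.toNat : Int)).natAbs ≠ 1 then 1 else 0
    | _, _, _, _ => 1   -- unreachable: both lists are nonempty here

-- ===== PORT B =====
-- running-minimum update: 'if m is None or o < m: m = o'
def bMin (m : Option Int) (o : Int) : Option Int :=
  match m with
  | none => some o
  | some v => if o < v then some o else some v

-- running-maximum update: 'if m is None or o > m: m = o'
def bMax (m : Option Int) (o : Int) : Option Int :=
  match m with
  | none => some o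
  | some v => if o > v then some o else some v

def solve_alt (A : String) : Int :=
  let s := A.toList.foldl
    (fun (s : Option Int × Option Int × Option Int × Option Int) char =>
      let o : Int := char.toNat
      if o % 2 == 0 then (bMin s.1 o, bMax s.2.1 o, s.2.2.1, s.2.2.2)
      else (s.1, s.2.1, bMin s.2.2.1 o, bMax s.2.2.2 o))
    (none, none, none, none)
  -- 'if minE is None or minO is None: return 1'; the max of a parity group is present iff its min is
  s.1.elim 1 (fun mnE =>
    s.2.2.1.elim 1 (fun mnO =>
      s.2.1.elim 1 (fun mxE =>
        s.2.2.2.elim 1 (fun mxO =>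
          if (mnE - mxO).natAbs = 1 ∧ (mxE - mnO).natAbs = 1 then 0 else 1))))

-- ===== PRECONDITION & SPEC =====
def Spec_solve (A : String) (out : Int) : Prop := out = solve_alt A
instance (A : String) (out : Int) : Decidable (Spec_solve A out) := by unfold Spec_solve; infer_instance

-- ===== CLAIM (what is proved, stated in full; the proofs are below) =====
def Claim_equal_solve : Prop := ∀ (A : String), Dom_solve A → Spec_solve A (solve A)

-- ===== LEMMAS AND PROOFS =====

-- the character's ordinal as an Int
def code (c : Char) : Int := c.toNat

lemma code_min (a b : Char) : code (min a b) = min (code a) (code b) := by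
  simp only [min_def, code]
  by_cases h : a ≤ b
  · have : (a.toNat : Int) ≤ (b.toNat : Int) := by
      exact_mod_cast Nat.le_of_lt_succ (Nat.lt_succ_of_le h)
    simp [h, this]
  · have hba : b ≤ a := le_of_not_ge h
    have : ¬ ((a.toNat : Int) ≤ (b.toNat : Int)) := by
      intro hc
      exact h (by exact_mod_cast hc)
    simp [h, this]

lemma code_max (a b : Char) : code (max a b) = max (code a) (code b) := by
  simp only [max_def, code]
  by_cases h : a ≤ b
  · have : (a.toNat : Int) ≤ (b.toNat : Int) := by
      exact_mod_cast Nat.le_of_lt_succ (Nat.lt_succ_of_le h)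
    simp [h, this]
  · have : ¬ ((a.toNat : Int) ≤ (b.toNat : Int)) := by
      intro hc
      exact h (by exact_mod_cast hc)
    simp [h, this]

lemma foldl_min_code (t : List Char) : ∀ x : Char,
    code (t.foldl min x) = (t.map code).foldl min (code x) := by
  induction t with
  | nil => intro x; simp
  | cons y t ih => intro x; simp [List.foldl, ih, code_min]

lemma foldl_max_code (t : List Char) : ∀ x : Char,
    code (t.foldl max x) = (t.map code).foldl max (code x) := by
  induction t with
  | nil => intro x; simp
  | cons y t ih => intro x; simp [List.foldl, ih, code_max]

lemma bMin_some (t : List Int) : ∀ v : Int, t.foldl bMin (some v) = some (t.foldl min v) := by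
  induction t with
  | nil => intro v; simp
  | cons y t ih =>
      intro v
      have : bMin (some v) y = some (min v y) := by
        simp only [bMin, min_def]
        split_ifs with h1 h2 h2 <;> simp <;> omega
      simp [List.foldl, this, ih]

lemma bMax_some (t : List Int) : ∀ v : Int, t.foldl bMax (some v) = some (t.foldl max v) := by
  induction t with
  | nil => intro v; simp
  | cons y t ih =>
      intro v
      have : bMax (some v) y = some (max v y) := by
        simp only [bMax, max_def]
        split_ifs with h1 h2 h2 <;> simp <;> omega
      simp [List.foldl, this, ih]

-- A's bucketing fold is filtering
lemma foldA_filter (l : List Char) : ∀ e o : List Char,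
    l.foldl (fun (p : List Char × List Char) char =>
      if char.toNat % 2 == 0 then (p.1 ++ [char], p.2) else (p.1, p.2 ++ [char])) (e, o)
    = (e ++ l.filter (fun c => c.toNat % 2 == 0), o ++ l.filter (fun c => ¬ (c.toNat % 2 == 0))) := by
  induction l with
  | nil => intro e o; simp
  | cons c l ih =>
      intro e o
      rw [List.foldl_cons]
      by_cases h : c.toNat % 2 = 0
      · rw [if_pos (by simpa using h), ih]
        simp [h]
      · have h1 : c.toNat % 2 = 1 := by omega
        rw [if_neg (by simpa using h), ih]
        simp [h1]

-- B's fold, expressed through the parity-filtered ordinal lists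
lemma foldB_filter (l : List Char) : ∀ (a b c d : Option Int),
    l.foldl (fun (s : Option Int × Option Int × Option Int × Option Int) char =>
      let o : Int := char.toNat
      if o % 2 == 0 then (bMin s.1 o, bMax s.2.1 o, s.2.2.1, s.2.2.2)
      else (s.1, s.2.1, bMin s.2.2.1 o, bMax s.2.2.2 o)) (a, b, c, d)
    = ((l.filter (fun c => c.toNat % 2 == 0)).map code |>.foldl bMin a,
       (l.filter (fun c => c.toNat % 2 == 0)).map code |>.foldl bMax b,
       (l.filter (fun c => ¬ (c.toNat % 2 == 0))).map code |>.foldl bMin c,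
       (l.filter (fun c => ¬ (c.toNat % 2 == 0))).map code |>.foldl bMax d) := by
  induction l with
  | nil => intro a b c d; simp
  | cons x l ih =>
      intro a b c d
      have hpar : (((x.toNat : Int)) % 2 == 0) = (x.toNat % 2 == 0) := by
        rcases Nat.even_or_odd x.toNat with h | h <;>
          · rcases h with ⟨k, hk⟩
            simp [hk]
            try omega
      rw [List.foldl_cons]
      by_cases h : x.toNat % 2 = 0
      · rw [if_pos (by rw [hpar]; simpa using h), ih]
        simp [h, code]
      · have h1 : x.toNat % 2 = 1 := by omega
        rw [if_neg (by rw [hpar]; simpa using h), ih]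
        simp [h1, code]

-- ===== VERDICT (by name: the statement is the Claim_ definition above) =====
theorem solve_spec : Claim_equal_solve := by
  unfold Claim_equal_solve
  intro A _
  unfold Spec_solve solve solve_alt
  rw [foldA_filter, foldB_filter]
  simp only [List.nil_append]
  generalize A.toList.filter (fun c => c.toNat % 2 == 0) = E
  generalize A.toList.filter (fun c => ¬ (c.toNat % 2 == 0)) = O
  rcases E with _ | ⟨x, t⟩
  · simp
  · rcases O with _ | ⟨y, u⟩
    · simp [Option.elim, bMin, bMin_some]
    · have eE : ((x :: t).map code).foldl bMin none = some ((t.map code).foldl min (code x)) := by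
        simp [bMin, bMin_some]
      have eE' : ((x :: t).map code).foldl bMax none = some ((t.map code).foldl max (code x)) := by
        simp [bMax, bMax_some]
      have eO : ((y :: u).map code).foldl bMin none = some ((u.map code).foldl min (code y)) := by
        simp [bMin, bMin_some]
      have eO' : ((y :: u).map code).foldl bMax none = some ((u.map code).foldl max (code y)) := by
        simp [bMax, bMax_some]
      rw [eE, eE', eO, eO', PySem.List.min?_id_cons, PySem.List.max?_id_cons,
         PySem.List.max?_id_cons, PySem.List.min?_id_cons]
      simp only [Option.elim]
      have m1 := foldl_min_code t x
      have m2 := foldl_max_code t x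
      have m3 := foldl_min_code u y
      have m4 := foldl_max_code u y
      simp only [List.length_cons, code] at m1 m2 m3 m4 ⊢
      simp only [← m1, ← m2, ← m3, ← m4]
      split_ifs with h1 h2 <;> first | rfl | (exfalso; tauto)
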